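-- pv_equiv track=rewrite | github.com/evanmichaelstrand/wordle | wordle/wordle.py | get_unknowns
-- ===== SOURCE A (Python) =====
-- def get_unknowns(colors):
--     blacks = []
--     yellows = []
--     unknowns = []
--     for i in range(5):
--         if colors[i] != 'g':
--             unknowns.append(i)
--             if colors[i] == 'b':
--                 blacks.append(i)
--             elif colors[i] == 'y':
--                 yellows.append(i)
--     return unknowns, blacks, yellows
-- ===== SOURCE B (Python) =====
-- def _categorize(colors, i):
--     if i == 5:
--         return [], [], []
--     unknowns, blacks, yellows = _categorize(colors, i + 1)
--     c = colors[i]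
--     if c == 'g':
--         return unknowns, blacks, yellows
--     if c == 'b':
--         return [i] + unknowns, [i] + blacks, yellows
--     if c == 'y':
--         return [i] + unknowns, blacks, [i] + yellows
--     return [i] + unknowns, blacks, yellows
--
--
-- def get_unknowns(colors):
--     return _categorize(colors, 0)
-- ===== Notes on version B (the rewrite author's own statement) =====
-- stated objective: alternative
-- what changed: Replaces the forward iterative loop with three mutating accumulators by a back-to-front recursion that builds all three lists by consing onto the recursive result, with a flat early-return branch chain instead of nested conditionals.
import Mathlib
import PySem

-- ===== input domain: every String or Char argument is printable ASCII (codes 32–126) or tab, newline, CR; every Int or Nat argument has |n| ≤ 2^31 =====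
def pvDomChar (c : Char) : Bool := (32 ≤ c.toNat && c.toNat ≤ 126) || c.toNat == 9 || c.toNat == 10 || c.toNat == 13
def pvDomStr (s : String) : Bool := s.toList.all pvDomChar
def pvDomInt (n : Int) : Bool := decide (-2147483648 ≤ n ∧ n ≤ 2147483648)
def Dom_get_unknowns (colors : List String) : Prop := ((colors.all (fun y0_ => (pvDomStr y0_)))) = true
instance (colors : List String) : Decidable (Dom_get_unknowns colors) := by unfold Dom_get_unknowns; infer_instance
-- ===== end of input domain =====

-- B replaces A's forward loop with three append-accumulators by a back-to-front
-- recursion that conses each index onto the recursive result (flat branch chain).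

-- ===== PORT A =====
-- the body of A's loop: one iteration updating (unknowns, blacks, yellows);
-- colors[i] is in range under Pre_, so pyGetD's default is never used there
def guStep (colors : List String) (st : List Int × List Int × List Int) (i : Int) :
    List Int × List Int × List Int :=
  if PySem.List.pyGetD colors i "" ≠ "g" then
    (st.1 ++ [i],
     if PySem.List.pyGetD colors i "" = "b" then st.2.1 ++ [i] else st.2.1,
     if PySem.List.pyGetD colors i "" = "b" then st.2.2
     else if PySem.List.pyGetD colors i "" = "y" then st.2.2 ++ [i] else st.2.2)
  else st

def get_unknowns (colors : List String) : List Int × List Int × List Int :=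
  (PySem.List.pyRange 0 5 1).foldl (guStep colors) ([], [], [])

-- ===== PORT B =====
-- _categorize: recursion from i up to 5, consing i onto the recursive result
-- (the final 'else' arm is a totality guard only; from i = 0 every call has i ≤ 5)
def guCategorize (colors : List String) (i : Nat) : List Int × List Int × List Int :=
  if i = 5 then ([], [], [])
  else if _h : i < 5 then
    let r := guCategorize colors (i + 1)
    let c := PySem.List.pyGetD colors (i : Int) ""
    if c = "g" then r
    else if c = "b" then ((i : Int) :: r.1, (i : Int) :: r.2.1, r.2.2)
    else if c = "y" then ((i : Int) :: r.1, r.2.1, (i : Int) :: r.2.2)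
    else ((i : Int) :: r.1, r.2.1, r.2.2)
  else ([], [], [])
termination_by 5 - i

def get_unknowns_alt (colors : List String) : List Int × List Int × List Int :=
  guCategorize colors 0

-- ===== PRECONDITION & SPEC =====
-- Python A indexes colors[0..4] and raises IndexError when fewer than 5 colors are given
def Pre_get_unknowns (colors : List String) : Prop := 5 ≤ colors.length
instance (colors : List String) : Decidable (Pre_get_unknowns colors) := by
  unfold Pre_get_unknowns; infer_instance
def pvWitness_get_unknowns : List String := ["g", "b", "y", "b", "g"]

def Spec_get_unknowns (colors : List String) (out : List Int × List Int × List Int) : Prop := out = get_unknowns_alt colors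
instance (colors : List String) (out : List Int × List Int × List Int) : Decidable (Spec_get_unknowns colors out) := by unfold Spec_get_unknowns; infer_instance

-- ===== CLAIM (what is proved, stated in full; the proofs are below) =====
def Claim_equal_get_unknowns : Prop := ∀ (colors : List String), Dom_get_unknowns colors → Pre_get_unknowns colors → Spec_get_unknowns colors (get_unknowns colors)

-- ===== LEMMAS AND PROOFS =====

-- A's fold over any index list equals the three filters, since colors[i] = "b"
-- (resp. "y") already implies colors[i] ≠ "g"
theorem get_unknowns_foldl_eq_filter (colors : List String) (l : List Int)
    (u b y : List Int) :
    l.foldl (guStep colors) (u, b, y)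
    = (u ++ l.filter (fun i => PySem.List.pyGetD colors i "" ≠ "g"),
       b ++ l.filter (fun i => PySem.List.pyGetD colors i "" = "b"),
       y ++ l.filter (fun i => PySem.List.pyGetD colors i "" = "y")) := by
  induction l generalizing u b y with
  | nil => simp
  | cons hd tl ih =>
    by_cases hg : PySem.List.pyGetD colors hd "" = "g" <;>
      by_cases hb : PySem.List.pyGetD colors hd "" = "b" <;>
        by_cases hy : PySem.List.pyGetD colors hd "" = "y" <;>
          simp_all [List.foldl_cons, guStep]

-- B's recursion from i computes the same three filters over range(i, 5)
theorem guCategorize_eq_filter (colors : List String) :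
    ∀ (n i : Nat), i + n = 5 →
    guCategorize colors i
    = ((PySem.List.pyRange (i : Int) 5 1).filter (fun j => PySem.List.pyGetD colors j "" ≠ "g"),
       (PySem.List.pyRange (i : Int) 5 1).filter (fun j => PySem.List.pyGetD colors j "" = "b"),
       (PySem.List.pyRange (i : Int) 5 1).filter (fun j => PySem.List.pyGetD colors j "" = "y")) := by
  intro n
  induction n with
  | zero =>
    intro i h
    have h5 : i = 5 := by omega
    subst h5
    rw [guCategorize.eq_def]
    simp
  | succ n ihn =>
    intro i h
    have hlt : i < 5 := by omega
    have hne : i ≠ 5 := by omega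
    have hcons : PySem.List.pyRange (i : Int) 5 1
        = (i : Int) :: PySem.List.pyRange ((i : Int) + 1) 5 1 :=
      PySem.List.pyRange_one_cons (by exact_mod_cast hlt)
    have hrec := ihn (i + 1) (by omega)
    rw [guCategorize.eq_def, if_neg hne, dif_pos hlt, hrec, hcons]
    push_cast
    split_ifs with hg hb hy <;> simp_all

-- ===== VERDICT (by name: the statement is the Claim_ definition above) =====
theorem get_unknowns_spec : Claim_equal_get_unknowns := by
  intro colors _ _
  unfold Spec_get_unknowns get_unknowns get_unknowns_alt
  rw [get_unknowns_foldl_eq_filter colors (PySem.List.pyRange 0 5 1) [] [] []]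
  have := guCategorize_eq_filter colors 5 0 (by omega)
  simpa using this.symm
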